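-- pv_equiv track=rewrite | github.com/dahrs/OSTI | bin/metaheuristics.py | getNbLongLines
-- ===== SOURCE A (Python) =====
-- def getNbLongLines(listOfSent, n=141):
--     ''' returns the number of long lines that exceed n characters '''
--     longLines = 0
--     for sent in listOfSent:
--         # make sure the sentence has no red keywords in it
--         sent = sent.replace(u'\033[1;31m', u'').replace(u'\033[0m', u'')
--         long = len(sent)
--         while long > n:
--             longLines += 1
--             long -= n
--     return longLines
-- ===== SOURCE B (Python) =====
-- def getNbLongLines(listOfSent, n=141):
--     ''' returns the number of long lines that exceed n characters '''
--     total = 0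
--     for sent in listOfSent:
--         L = len(sent.replace(u'\033[1;31m', u'').replace(u'\033[0m', u''))
--         if L > 0:
--             total += (L - 1) // n
--     return total
-- ===== Notes on version B (the rewrite author's own statement) =====
-- stated objective: simpler
-- what changed: The inner while loop that repeatedly subtracts n from the length is replaced by the closed-form (L-1)//n per nonempty stripped sentence.
import Mathlib
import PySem

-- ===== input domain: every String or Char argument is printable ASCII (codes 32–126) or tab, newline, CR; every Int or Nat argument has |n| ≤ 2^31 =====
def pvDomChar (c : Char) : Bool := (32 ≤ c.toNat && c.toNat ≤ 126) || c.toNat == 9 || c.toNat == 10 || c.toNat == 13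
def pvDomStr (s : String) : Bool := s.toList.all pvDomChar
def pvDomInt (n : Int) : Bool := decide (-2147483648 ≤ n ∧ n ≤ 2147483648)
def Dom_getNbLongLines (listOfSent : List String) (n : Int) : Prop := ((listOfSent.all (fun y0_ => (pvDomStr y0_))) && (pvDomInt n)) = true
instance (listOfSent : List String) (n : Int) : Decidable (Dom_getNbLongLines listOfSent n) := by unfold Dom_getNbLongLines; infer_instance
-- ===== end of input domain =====

-- B replaces A's inner while loop (repeatedly subtract n) by the closed form (L-1)//n per nonempty stripped sentence; equal on Pre_ (where A terminates).

-- shared text helper (the two .replace ANSI strips, identical in A and B)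
def pvStrip (s : String) : String :=
  PySem.Str.replace (PySem.Str.replace s "\x1b[1;31m" "") "\x1b[0m" ""

-- ===== PORT A =====
-- 'while long > n: longLines += 1; long -= n' ; the '0 < n' conjunct is a totality
-- guard only (Python diverges there; such inputs are outside Pre_)
def whileLongA (n long longLines : Int) : Int :=
  if h : n < long ∧ 0 < n then whileLongA n (long - n) (longLines + 1) else longLines
termination_by (long - n).toNat
decreasing_by omega

def getNbLongLines (listOfSent : List String) (n : Int) : Int :=
  listOfSent.foldl (fun longLines sent =>
    whileLongA n (PySem.Str.len (pvStrip sent)) longLines) 0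

-- ===== PORT B =====
def getNbLongLines_alt (listOfSent : List String) (n : Int) : Int :=
  listOfSent.foldl (fun total sent =>
    let L := PySem.Str.len (pvStrip sent)
    if 0 < L then total + PySem.Int.floordiv (L - 1) n else total) 0

-- ===== PRECONDITION & SPEC =====
-- Pre_ excludes exactly the inputs where A's while loop never terminates (n ≤ 0 with some
-- nonempty stripped sentence); A returns on every input satisfying Pre_.
def Pre_getNbLongLines (listOfSent : List String) (n : Int) : Prop :=
  0 < n ∨ ∀ s ∈ listOfSent, PySem.Str.len (pvStrip s) ≤ n
instance (listOfSent : List String) (n : Int) : Decidable (Pre_getNbLongLines listOfSent n) := by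
  unfold Pre_getNbLongLines; infer_instance

def pvWitness_getNbLongLines : List String × Int := (["hello", "", "abc def"], 3)

def Spec_getNbLongLines (listOfSent : List String) (n : Int) (out : Int) : Prop := out = getNbLongLines_alt listOfSent n
instance (listOfSent : List String) (n : Int) (out : Int) : Decidable (Spec_getNbLongLines listOfSent n out) := by unfold Spec_getNbLongLines; infer_instance

-- ===== CLAIM (what is proved, stated in full; the proofs are below) =====
def Claim_equal_getNbLongLines : Prop := ∀ (listOfSent : List String) (n : Int), Dom_getNbLongLines listOfSent n → Pre_getNbLongLines listOfSent n → Spec_getNbLongLines listOfSent n (getNbLongLines listOfSent n)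

-- ===== LEMMAS AND PROOFS =====

-- the loop's iteration count is the closed form (L-1)//n, for 0 < n and 0 ≤ L
lemma whileLongA_closed (n : Int) (hn : 0 < n) :
    ∀ (k : Nat) (long acc : Int), 0 ≤ long → (long - n).toNat ≤ k →
      whileLongA n long acc =
        if 0 < long then acc + PySem.Int.floordiv (long - 1) n else acc := by
  intro k
  induction k with
  | zero =>
    intro long acc hL hk
    rw [whileLongA]
    have hle : long ≤ n := by omega
    rw [dif_neg (by omega)]
    split_ifs with hpos
    · have : PySem.Int.floordiv (long - 1) n = 0 := by
        rw [PySem.Int.floordiv_eq_ediv_of_pos hn]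
        exact Int.ediv_eq_zero_of_lt (by omega) (by omega)
      omega
    · rfl
  | succ k ih =>
    intro long acc hL hk
    rw [whileLongA]
    by_cases h : n < long
    · rw [dif_pos ⟨h, hn⟩]
      rw [ih (long - n) (acc + 1) (by omega) (by omega)]
      rw [if_pos (by omega), if_pos (by omega)]
      have : long - 1 = (long - n - 1) + 1 * n := by ring
      rw [this, PySem.Int.floordiv_eq_ediv_of_pos hn, PySem.Int.floordiv_eq_ediv_of_pos hn,
        Int.add_mul_ediv_right _ _ (by omega : n ≠ 0)]
      ring
    · rw [dif_neg (by omega)]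
      split_ifs with hpos
      · have : PySem.Int.floordiv (long - 1) n = 0 := by
          rw [PySem.Int.floordiv_eq_ediv_of_pos hn]
          exact Int.ediv_eq_zero_of_lt (by omega) (by omega)
        omega
      · rfl

-- per-sentence agreement of the two loop bodies, under Pre_'s disjunct for this sentence
lemma step_eq (n L acc : Int) (hL : 0 ≤ L) (h : 0 < n ∨ L ≤ n) :
    whileLongA n L acc = if 0 < L then acc + PySem.Int.floordiv (L - 1) n else acc := by
  rcases h with hn | hle
  · exact whileLongA_closed n hn (L - n).toNat L acc hL le_rfl
  · by_cases hn : 0 < n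
    · exact whileLongA_closed n hn (L - n).toNat L acc hL le_rfl
    · rw [whileLongA, dif_neg (by omega), if_neg (by omega)]

lemma fold_eq (n : Int) :
    ∀ (l : List String) (acc : Int),
      (0 < n ∨ ∀ s ∈ l, PySem.Str.len (pvStrip s) ≤ n) →
      l.foldl (fun longLines sent => whileLongA n (PySem.Str.len (pvStrip sent)) longLines) acc =
      l.foldl (fun total sent =>
        let L := PySem.Str.len (pvStrip sent)
        if 0 < L then total + PySem.Int.floordiv (L - 1) n else total) acc := by
  intro l
  induction l with
  | nil => intro acc _; rw [List.foldl_nil, List.foldl_nil]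
  | cons s t ih =>
    intro acc h
    rw [List.foldl_cons, List.foldl_cons]
    have hL : (0:Int) ≤ PySem.Str.len (pvStrip s) := by
      rw [PySem.Str.len_eq]; exact Int.natCast_nonneg _
    rw [step_eq n (PySem.Str.len (pvStrip s)) acc hL
      (by rcases h with h | h; exact Or.inl h; exact Or.inr (h s (by simp)))]
    exact ih _ (by rcases h with h | h; exact Or.inl h; exact Or.inr fun x hx => h x (by simp [hx]))

-- ===== VERDICT (by name: the statement is the Claim_ definition above) =====
theorem getNbLongLines_spec : Claim_equal_getNbLongLines := by
  intro l n _ hpre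
  unfold Spec_getNbLongLines getNbLongLines getNbLongLines_alt
  exact fold_eq n l 0 hpre
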